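-- pv_equiv track=rewrite | github.com/chw0912/CodingTest | 프로그래머스/2/388352. 비밀 코드 해독/비밀 코드 해독.py | solution
-- ===== SOURCE A (Python) =====
-- from itertools import combinations
--
-- def solution(n, q, ans):
--     answer = 0
--
--     nums = [i for i in range(1, n+1)]
--
--     combi = combinations(nums, 5)
--
--     for com in combi:
--         flag = True
--         for i in range(len(q)):
--             if len(list(set(com) & set(q[i]))) != ans[i]:
--                 flag = False
--
--         if not flag:
--             continue
--         answer += 1
--
--
--     return answer
-- ===== SOURCE B (Python) =====
-- from itertools import combinations
-- import math
--
-- def solution(n, q, ans):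
--     # Anchor on the first query: any counted 5-set S has exactly ans[0] elements
--     # inside set(q[0]), so enumerate those directly instead of all C(n,5) sets.
--     if not q:
--         return math.comb(max(n, 0), 5)
--     qs = [set(code) for code in q]
--     g = [x for x in range(1, n + 1) if x in qs[0]]
--     rest = [x for x in range(1, n + 1) if x not in qs[0]]
--     a0 = ans[0]
--     if a0 < 0 or a0 > 5:
--         return 0
--     total = 0
--     for c1 in combinations(g, a0):
--         for c2 in combinations(rest, 5 - a0):
--             cand = set(c1 + c2)
--             if all(len(cand & qs[i]) == ans[i] for i in range(1, len(q))):
--                 total += 1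
--     return total
-- ===== Notes on version B (the rewrite author's own statement) =====
-- stated objective: faster
-- what changed: Instead of scanning all C(n,5) combinations and testing every query, B anchors on the first query: it enumerates ans[0]-subsets of the numbers inside set(q[0]) times (5-ans[0])-subsets of the rest, so the first constraint holds by construction and far fewer candidates are generated; the empty-q case becomes the closed form C(n,5).
-- outside the precondition, e.g. on solution(0, [[1]], []): A returns 0, B raises IndexError
import Mathlib
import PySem

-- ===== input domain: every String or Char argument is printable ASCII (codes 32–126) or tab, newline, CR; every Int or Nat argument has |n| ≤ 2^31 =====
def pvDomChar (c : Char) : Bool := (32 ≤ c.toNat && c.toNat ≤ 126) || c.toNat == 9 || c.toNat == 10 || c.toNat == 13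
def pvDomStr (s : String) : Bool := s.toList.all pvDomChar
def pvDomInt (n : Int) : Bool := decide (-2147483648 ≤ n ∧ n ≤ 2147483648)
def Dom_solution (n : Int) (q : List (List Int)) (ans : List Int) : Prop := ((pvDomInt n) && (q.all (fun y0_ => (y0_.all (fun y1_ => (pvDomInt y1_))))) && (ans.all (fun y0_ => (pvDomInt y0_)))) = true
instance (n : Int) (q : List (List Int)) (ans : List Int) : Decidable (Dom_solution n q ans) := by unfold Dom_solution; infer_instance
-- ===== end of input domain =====

-- B anchors the enumeration on the first query instead of scanning all C(n,5) combinations.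

-- itertools.combinations(l, k) in lexicographic order (shared helper: both Pythons call it)
def comb {α : Type} : Nat → List α → List (List α)
  | 0, _ => [[]]
  | _ + 1, [] => []
  | k + 1, x :: xs => (comb k xs).map (x :: ·) ++ comb (k + 1) xs

-- ===== PORT A =====
def solution (n : Int) (q : List (List Int)) (ans : List Int) : Int :=
  let nums := PySem.List.pyRange 1 (n + 1) 1
  (comb 5 nums).foldl (fun answer com =>
    let flag := (PySem.List.pyRange 0 (q.length : Int) 1).foldl (fun flag i =>
      if (((PySem.Set.ofList com).inter (PySem.Set.ofList (PySem.List.pyGetD q i []))).length : Int)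
           ≠ PySem.List.pyGetD ans i 0 then false else flag) true
    if !flag then answer else answer + 1) 0

-- ===== PORT B =====
def solution_alt (n : Int) (q : List (List Int)) (ans : List Int) : Int :=
  if q = [] then ((max n 0).toNat.choose 5 : Int)
  else
    let qs := q.map (fun code => PySem.Set.ofList code)
    let qs0 := PySem.List.pyGetD qs 0 []
    let g := (PySem.List.pyRange 1 (n + 1) 1).filter (fun x => PySem.Set.contains qs0 x)
    let rest := (PySem.List.pyRange 1 (n + 1) 1).filter (fun x => !PySem.Set.contains qs0 x)
    let a0 := PySem.List.pyGetD ans 0 0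
    if a0 < 0 ∨ 5 < a0 then 0
    else
      (comb a0.toNat g).foldl (fun total c1 =>
        (comb (5 - a0).toNat rest).foldl (fun total c2 =>
          let cand := PySem.Set.ofList (c1 ++ c2)
          if (PySem.List.pyRange 1 (q.length : Int) 1).all (fun i =>
               ((cand.inter (PySem.List.pyGetD qs i [])).length : Int) == PySem.List.pyGetD ans i 0)
          then total + 1 else total) total) 0

-- ===== PRECONDITION & SPEC =====
-- Pre_ excludes the inputs where A raises IndexError (len(ans) < len(q) with n ≥ 5, so the loop
-- reaches a missing ans[i]) and the corner q ≠ [] with ans = [], where B's anchored algorithm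
-- raises on ans[0] while A's loop over zero combinations returns 0.
def Pre_solution (n : Int) (q : List (List Int)) (ans : List Int) : Prop :=
  (q.length ≤ ans.length ∨ n < 5) ∧ (q = [] ∨ ans ≠ [])
instance (n : Int) (q : List (List Int)) (ans : List Int) : Decidable (Pre_solution n q ans) := by unfold Pre_solution; infer_instance
def pvWitness_solution : Int × List (List Int) × List Int := (6, [[1, 2, 3]], [1])

def Spec_solution (n : Int) (q : List (List Int)) (ans : List Int) (out : Int) : Prop := out = solution_alt n q ans
instance (n : Int) (q : List (List Int)) (ans : List Int) (out : Int) : Decidable (Spec_solution n q ans out) := by unfold Spec_solution; infer_instance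

-- ===== CLAIM (what is proved, stated in full; the proofs are below) =====
def Claim_equal_solution : Prop := ∀ (n : Int) (q : List (List Int)) (ans : List Int), Dom_solution n q ans → Pre_solution n q ans → Spec_solution n q ans (solution n q ans)

-- ===== LEMMAS AND PROOFS =====

theorem comb_length {α : Type} (l : List α) : ∀ (k : Nat), (comb k l).length = l.length.choose k := by
  induction l with
  | nil => intro k; cases k <;> simp [comb]
  | cons x xs ih =>
    intro k; cases k with
    | zero => simp [comb]
    | succ k => simp [comb, ih, Nat.choose_succ_succ', Nat.add_comm]

theorem mem_comb {α : Type} {l : List α} : ∀ {k : Nat} {c : List α}, c ∈ comb k l → c.Sublist l ∧ c.length = k := by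
  induction l with
  | nil => intro k c h; cases k <;> simp_all [comb]
  | cons x xs ih =>
    intro k c h
    cases k with
    | zero => simp [comb] at h; simp [h]
    | succ k =>
      simp only [comb, List.mem_append, List.mem_map] at h
      rcases h with ⟨c', hc', rfl⟩ | h
      · obtain ⟨h1, h2⟩ := ih hc'
        exact ⟨h1.cons_cons x, by simp [h2]⟩
      · obtain ⟨h1, h2⟩ := ih h
        exact ⟨h1.cons _, h2⟩

theorem countP_flatMap {α β : Type} (p : β → Bool) (f : α → List β) (l : List α) :
    List.countP p (l.flatMap f) = (l.map (fun a => List.countP p (f a))).sum := by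
  induction l with
  | nil => rfl
  | cons a l ih => simp [List.countP_append, ih]

theorem foldl_flag {α : Type} (P : α → Prop) [DecidablePred P] (l : List α) (b : Bool) :
    l.foldl (fun flag i => if P i then false else flag) b = (b && l.all (fun i => !(decide (P i)))) := by
  induction l generalizing b with
  | nil => simp
  | cons x l ih =>
    rw [List.foldl_cons, List.all_cons]
    by_cases h : P x
    · rw [if_pos h, ih]; simp [h]
    · rw [if_neg h, ih]; simp [h, Bool.and_assoc]

theorem foldl_count {α : Type} (P : α → Prop) [DecidablePred P] (l : List α) (s : Int) :
    l.foldl (fun a x => if P x then a + 1 else a) s = s + (List.countP (fun x => decide (P x)) l : Int) := by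
  induction l generalizing s with
  | nil => simp
  | cons x l ih =>
    simp only [List.foldl_cons, List.countP_cons]
    by_cases h : P x <;> simp [h, ih] <;> push_cast <;> ring

theorem foldl_sum {α : Type} (f : α → Int) (l : List α) (s : Int) :
    l.foldl (fun a x => a + f x) s = s + (l.map f).sum := by
  induction l generalizing s with
  | nil => simp
  | cons x l ih => simp [ih]; ring

theorem flatMap_append_perm {α β : Type} (f g : α → List β) (l : List α) :
    (l.flatMap f ++ l.flatMap g).Perm (l.flatMap (fun a => f a ++ g a)) := by
  induction l with
  | nil => simp
  | cons a l ih =>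
    simp only [List.flatMap_cons, List.append_assoc]
    refine List.Perm.append_left (f a) ?_
    refine List.Perm.trans ?_ (List.Perm.append_left (g a) ih)
    rw [← List.append_assoc, ← List.append_assoc]
    exact List.Perm.append_right _ List.perm_append_comm

theorem countP_comb_perm {α : Type} :
    ∀ {l1 l2 : List α}, l1.Perm l2 →
      ∀ (p : List α → Bool), (∀ a b : List α, a.Perm b → p a = p b) →
      ∀ (k : Nat), List.countP p (comb k l1) = List.countP p (comb k l2) := by
  intro l1 l2 h
  induction h with
  | nil => intro p hp k; rfl
  | cons x h ih =>
    intro p hp k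
    cases k with
    | zero => rfl
    | succ k =>
      simp only [comb, List.countP_append, List.countP_map, Function.comp_def]
      rw [ih p hp (k + 1), ih (fun c => p (x :: c)) (fun a b hab => hp _ _ (hab.cons x)) k]
  | swap x y l =>
    intro p hp k
    cases k with
    | zero => rfl
    | succ k =>
      cases k with
      | zero =>
        simp only [comb, List.countP_append, List.countP_map, List.countP_cons, List.countP_nil]
        omega
      | succ k =>
        simp only [comb, List.countP_append, List.countP_map, Function.comp_def]
        have hxy : (fun c => p (x :: y :: c)) = (fun c => p (y :: x :: c)) :=
          funext fun c => hp _ _ (List.Perm.swap y x c)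
        rw [hxy]
        omega
  | trans h1 h2 ih1 ih2 =>
    intro p hp k
    rw [ih1 p hp k, ih2 p hp k]

theorem comb_append_perm {α : Type} (l2 : List α) :
    ∀ (l1 : List α) (k : Nat),
    (comb k (l1 ++ l2)).Perm
      ((List.range (k + 1)).flatMap (fun j =>
        (comb j l1).flatMap (fun c1 => (comb (k - j) l2).map (c1 ++ ·)))) := by
  intro l1
  induction l1 with
  | nil =>
    intro k
    rw [List.range_succ_eq_map]
    simp only [List.nil_append, List.flatMap_cons, comb, List.flatMap_map, Function.comp_def,
      List.flatMap_nil, List.map_id', Nat.sub_zero]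
    have h0 : (List.range k).flatMap (fun a => ([] : List (List α))) = [] := by
      simp [List.flatMap_eq_nil_iff]
    simp [h0]
  | cons x l1 ih =>
    intro k
    cases k with
    | zero => simp [comb]
    | succ k =>
      refine List.Perm.trans (List.Perm.append (List.Perm.map _ (ih k)) (ih (k + 1))) ?_
      rw [show List.range (k+1+1) = 0 :: List.map Nat.succ (List.range (k+1)) from List.range_succ_eq_map]
      simp only [List.flatMap_cons, List.flatMap_map, List.flatMap_append, comb,
        List.map_flatMap, List.map_map, Nat.succ_sub_succ, List.nil_append,
        Function.comp_def, List.cons_append, Nat.sub_zero, List.flatMap_nil,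
        List.map_id', List.append_nil, Nat.succ_eq_add_one]
      refine List.Perm.trans ?_ ((flatMap_append_perm _ _ _).append_left _)
      rw [← List.append_assoc, ← List.append_assoc]
      exact List.Perm.append_right _ List.perm_append_comm


-- abbreviations for the intersection count and A's per-combination check
def cnt (com qi : List Int) : Nat :=
  ((PySem.Set.ofList com).inter (PySem.Set.ofList qi)).length

def checkA (q : List (List Int)) (ans : List Int) (com : List Int) : Bool :=
  (PySem.List.pyRange 0 (q.length : Int) 1).all (fun i =>
    !(decide (((cnt com (PySem.List.pyGetD q i []) : Nat) : Int) ≠ PySem.List.pyGetD ans i 0)))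

def checkTail (q : List (List Int)) (ans : List Int) (com : List Int) : Bool :=
  (PySem.List.pyRange 1 (q.length : Int) 1).all (fun i =>
    !(decide (((cnt com (PySem.List.pyGetD q i []) : Nat) : Int) ≠ PySem.List.pyGetD ans i 0)))

theorem contains_ofList_eq_decide (qi : List Int) (x : Int) :
    PySem.Set.contains (PySem.Set.ofList qi) x = decide (x ∈ qi) := by
  by_cases h : x ∈ qi
  · simp [PySem.Set.contains_iff, PySem.Set.mem_ofList, h]
  · simp only [h, decide_false]
    by_contra hc
    rw [Bool.not_eq_false] at hc
    exact h ((PySem.Set.mem_ofList qi x).mp ((PySem.Set.contains_iff _ _).mp hc))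

theorem cnt_eq_countP {com : List Int} (h : com.Nodup) (qi : List Int) :
    cnt com qi = com.countP (fun x => decide (x ∈ qi)) := by
  unfold cnt
  rw [PySem.Set.ofList_eq_self_of_nodup com h]
  rw [List.countP_eq_length_filter]
  simp [PySem.Set.inter, contains_ofList_eq_decide]

theorem cnt_perm {a b : List Int} (h : a.Perm b) (qi : List Int) : cnt a qi = cnt b qi := by
  unfold cnt
  have hperm : (PySem.Set.ofList a).Perm (PySem.Set.ofList b) := by
    rw [List.perm_ext_iff_of_nodup (PySem.Set.nodup_ofList a) (PySem.Set.nodup_ofList b)]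
    intro x
    simp [PySem.Set.mem_ofList, h.mem_iff]
  simpa [PySem.Set.inter] using (hperm.filter _).length_eq

theorem all_congr' {α : Type} {l : List α} {f g : α → Bool} (h : ∀ a ∈ l, f a = g a) :
    l.all f = l.all g := by
  induction l with
  | nil => rfl
  | cons a l ih =>
    simp only [List.all_cons]
    rw [h a (List.mem_cons_self), ih (fun a ha => h a (List.mem_cons_of_mem _ ha))]

theorem checkA_perm (q : List (List Int)) (ans : List Int) {a b : List Int} (h : a.Perm b) :
    checkA q ans a = checkA q ans b := by
  unfold checkA
  exact all_congr' (fun i _ => by rw [cnt_perm h])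

theorem solution_eq_countP (n : Int) (q : List (List Int)) (ans : List Int) :
    solution n q ans = ((comb 5 (PySem.List.pyRange 1 (n + 1) 1)).countP (checkA q ans) : Int) := by
  unfold solution
  have hfun : (fun (answer : Int) (com : List Int) =>
      let flag := (PySem.List.pyRange 0 (q.length : Int) 1).foldl (fun flag i =>
        if (((PySem.Set.ofList com).inter (PySem.Set.ofList (PySem.List.pyGetD q i []))).length : Int)
             ≠ PySem.List.pyGetD ans i 0 then false else flag) true
      if !flag then answer else answer + 1)
      = (fun answer com => if checkA q ans com = true then answer + 1 else answer) := by
    funext a com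
    show (if !((PySem.List.pyRange 0 (q.length : Int) 1).foldl _ true) then a else a + 1) = _
    rw [foldl_flag (fun i =>
      (((PySem.Set.ofList com).inter (PySem.Set.ofList (PySem.List.pyGetD q i []))).length : Int)
        ≠ PySem.List.pyGetD ans i 0)]
    simp only [Bool.true_and]
    show (if !(checkA q ans com) then a else a + 1) = _
    cases h : checkA q ans com <;> simp [h]
  rw [hfun, foldl_count (fun com => checkA q ans com = true)]
  simp [Bool.decide_coe]

theorem beq_eq_not_decide_ne (a b : Int) : (a == b) = !(decide (a ≠ b)) := by
  by_cases h : a = b <;> simp [h]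

theorem cast_sum_map {α : Type} (f : α → Nat) (l : List α) :
    (((l.map f).sum : Nat) : Int) = (l.map (fun a => ((f a : Nat) : Int))).sum := by
  induction l with
  | nil => rfl
  | cons a l ih => simp [ih]

theorem checkA_split (q0 : List Int) (qt : List (List Int)) (ans : List Int)
    (c1 c2 : List Int) (h1 : ∀ x ∈ c1, x ∈ q0) (h2 : ∀ x ∈ c2, x ∉ q0)
    (hn : (c1 ++ c2).Nodup) :
    checkA (q0 :: qt) ans (c1 ++ c2) =
      (decide ((c1.length : Int) = PySem.List.pyGetD ans 0 0)
        && checkTail (q0 :: qt) ans (c1 ++ c2)) := by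
  unfold checkA checkTail
  have hlen : (0 : Int) < ((q0 :: qt).length : Int) := by
    simp only [List.length_cons]; push_cast; omega
  rw [PySem.List.pyRange_one_cons hlen, List.all_cons,
    show (0 : Int) + 1 = 1 by norm_num]
  congr 1
  have hq0 : PySem.List.pyGetD (q0 :: qt) 0 [] = q0 := by
    rw [PySem.List.pyGetD_ofNat']; rfl
  have hcnt : cnt (c1 ++ c2) q0 = c1.length := by
    rw [cnt_eq_countP hn, List.countP_append]
    have ha : List.countP (fun x => decide (x ∈ q0)) c1 = c1.length :=
      List.countP_eq_length.mpr (fun a ha => by simp [h1 a ha])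
    have hb : List.countP (fun x => decide (x ∈ q0)) c2 = 0 :=
      List.countP_eq_zero.mpr (fun a ha => by simp [h2 a ha])
    omega
  rw [hq0, hcnt]
  by_cases h : (c1.length : Int) = PySem.List.pyGetD ans 0 0 <;> simp [h]

theorem countP_term (q0 : List Int) (qt : List (List Int)) (ans : List Int)
    (rest : List Int) (m : Nat) (c1 : List Int)
    (h1 : ∀ x ∈ c1, x ∈ q0) (hc1 : c1.Nodup)
    (hrq : ∀ x ∈ rest, x ∉ q0) (hrn : rest.Nodup) :
    List.countP (fun c2 => checkA (q0 :: qt) ans (c1 ++ c2)) (comb m rest) =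
      if (c1.length : Int) = PySem.List.pyGetD ans 0 0 then
        List.countP (fun c2 => checkTail (q0 :: qt) ans (c1 ++ c2)) (comb m rest)
      else 0 := by
  have hsplit : ∀ c2 ∈ comb m rest,
      checkA (q0 :: qt) ans (c1 ++ c2) =
        (decide ((c1.length : Int) = PySem.List.pyGetD ans 0 0)
          && checkTail (q0 :: qt) ans (c1 ++ c2)) := by
    intro c2 hc2
    obtain ⟨hsub, -⟩ := mem_comb hc2
    have h2 : ∀ x ∈ c2, x ∉ q0 := fun x hx => hrq x (hsub.mem hx)
    have hn : (c1 ++ c2).Nodup := by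
      refine hc1.append (hsub.nodup hrn) ?_
      intro x hx1 hx2
      exact h2 x hx2 (h1 x hx1)
    exact checkA_split q0 qt ans c1 c2 h1 h2 hn
  by_cases h : (c1.length : Int) = PySem.List.pyGetD ans 0 0
  · rw [if_pos h]
    exact List.countP_congr (fun c2 hc2 => by rw [hsplit c2 hc2]; simp [h])
  · rw [if_neg h]
    refine List.countP_eq_zero.mpr (fun c2 hc2 => ?_)
    rw [hsplit c2 hc2]; simp [h]

theorem checkB_eq (q : List (List Int)) (ans : List Int) (com : List Int) :
    ((PySem.List.pyRange 1 ((q.length : Int)) 1).all (fun i =>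
      (((PySem.Set.ofList com).inter
        (PySem.List.pyGetD (q.map (fun code => PySem.Set.ofList code)) i [])).length : Int)
        == PySem.List.pyGetD ans i 0))
      = checkTail q ans com := by
  unfold checkTail cnt
  apply all_congr'
  intro i hi
  obtain ⟨hi1, hi2⟩ := PySem.List.mem_pyRange_one.mp hi
  have h0 : (0 : Int) ≤ i := by omega
  have hk : i.toNat < q.length := by omega
  have hk' : i.toNat < (q.map (fun code => PySem.Set.ofList code)).length := by
    simpa using hk
  have hqs : PySem.List.pyGetD (q.map (fun code => PySem.Set.ofList code)) i []
      = PySem.Set.ofList (PySem.List.pyGetD q i []) := by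
    rw [PySem.List.pyGetD_of_nonneg _ _ h0, PySem.List.pyGetD_of_nonneg _ _ h0,
      List.getD_eq_getElem _ _ hk', List.getD_eq_getElem _ _ hk, List.getElem_map]
  rw [hqs, beq_eq_not_decide_ne]

theorem foldl_count_bool {α : Type} (p : α → Bool) (l : List α) (s : Int) :
    l.foldl (fun a x => if p x then a + 1 else a) s = s + (l.countP p : Int) := by
  induction l generalizing s with
  | nil => simp
  | cons x l ih =>
    simp only [List.foldl_cons, List.countP_cons]
    cases h : p x <;> simp [h, ih] <;> push_cast <;> ring

theorem sumB_eq (n : Int) (q0 : List Int) (qt : List (List Int)) (ans : List Int)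
    (hr : ¬(PySem.List.pyGetD ans 0 0 < 0 ∨ 5 < PySem.List.pyGetD ans 0 0)) :
    solution_alt n (q0 :: qt) ans =
      ((comb (PySem.List.pyGetD ans 0 0).toNat
          ((PySem.List.pyRange 1 (n + 1) 1).filter
            (fun x => PySem.Set.contains (PySem.Set.ofList q0) x))).map
        (fun c1 => ((List.countP (fun c2 => checkTail (q0 :: qt) ans (c1 ++ c2))
            (comb (5 - PySem.List.pyGetD ans 0 0).toNat
              ((PySem.List.pyRange 1 (n + 1) 1).filter
                (fun x => !PySem.Set.contains (PySem.Set.ofList q0) x))) : Nat) : Int))).sum := by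
  have hqs0 : PySem.List.pyGetD ((q0 :: qt).map (fun code => PySem.Set.ofList code)) 0 []
      = PySem.Set.ofList q0 := by
    rw [PySem.List.pyGetD_ofNat']; rfl
  unfold solution_alt
  rw [if_neg (by simp : ¬(q0 :: qt = ([] : List (List Int))))]
  simp only [hqs0]
  rw [if_neg hr]
  simp only [foldl_count_bool, foldl_sum, zero_add]
  congr 1
  apply List.map_congr_left
  intro c1 _
  congr 1
  apply List.countP_congr
  intro c2 _
  rw [checkB_eq (q0 :: qt) ans (c1 ++ c2)]

theorem main_eq (n : Int) (q : List (List Int)) (ans : List Int) :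
    solution n q ans = solution_alt n q ans := by
  rw [solution_eq_countP]
  cases q with
  | nil =>
    have hall : ∀ com ∈ comb 5 (PySem.List.pyRange 1 (n + 1) 1), checkA [] ans com = true := by
      intro com _
      simp [checkA, PySem.List.pyRange_zero]
    rw [List.countP_eq_length.mpr hall, comb_length]
    unfold solution_alt
    rw [if_pos rfl]
    have hl : (PySem.List.pyRange 1 (n + 1) 1).length = (max n 0).toNat := by
      rw [PySem.List.length_pyRange_one]; omega
    rw [hl]
  | cons q0 qt =>
    set a0 := PySem.List.pyGetD ans 0 0 with ha0
    set nums := PySem.List.pyRange 1 (n + 1) 1 with hnums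
    set g := nums.filter (fun x => PySem.Set.contains (PySem.Set.ofList q0) x) with hgdef
    set rest := nums.filter (fun x => !PySem.Set.contains (PySem.Set.ofList q0) x) with hrdef
    have hnodup : nums.Nodup := PySem.List.nodup_pyRange_one 1 (n + 1)
    have hperm : nums.Perm (g ++ rest) := (List.filter_append_perm _ nums).symm
    have hgmem : ∀ x ∈ g, x ∈ q0 := by
      intro x hx
      obtain ⟨-, hc⟩ := List.mem_filter.mp hx
      exact (PySem.Set.mem_ofList q0 x).mp ((PySem.Set.contains_iff _ _).mp hc)
    have hrmem : ∀ x ∈ rest, x ∉ q0 := by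
      intro x hx hmem
      obtain ⟨-, hc⟩ := List.mem_filter.mp hx
      rw [contains_ofList_eq_decide] at hc
      simp [hmem] at hc
    have hgnod : g.Nodup := hnodup.filter _
    have hrnod : rest.Nodup := hnodup.filter _
    rw [countP_comb_perm hperm (checkA _ ans) (fun a b hab => checkA_perm _ ans hab) 5,
        (comb_append_perm rest g 5).countP_eq, countP_flatMap]
    have hterm : ∀ j ∈ List.range 6,
        List.countP (checkA (q0 :: qt) ans)
            ((comb j g).flatMap (fun c1 => (comb (5 - j) rest).map (c1 ++ ·)))
          = if (j : Int) = a0 then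
              ((comb j g).map (fun c1 =>
                List.countP (fun c2 => checkTail (q0 :: qt) ans (c1 ++ c2))
                  (comb (5 - j) rest))).sum
            else 0 := by
      intro j hj
      rw [countP_flatMap]
      have hmapeq : ∀ c1 ∈ comb j g,
          List.countP (checkA (q0 :: qt) ans) ((comb (5 - j) rest).map (c1 ++ ·))
            = if (j : Int) = a0 then
                List.countP (fun c2 => checkTail (q0 :: qt) ans (c1 ++ c2)) (comb (5 - j) rest)
              else 0 := by
        intro c1 hc1
        obtain ⟨hsub1, hlen1⟩ := mem_comb hc1
        rw [List.countP_map]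
        have hct := countP_term q0 qt ans rest (5 - j) c1
          (fun x hx => hgmem x (hsub1.mem hx)) (hsub1.nodup hgnod) hrmem hrnod
        rw [show ((checkA (q0 :: qt) ans) ∘ (c1 ++ ·))
              = fun c2 => checkA (q0 :: qt) ans (c1 ++ c2) from rfl, hct, hlen1, ha0]
      rw [List.map_congr_left hmapeq]
      by_cases hj0 : (j : Int) = a0
      · rw [if_pos hj0]
        simp only [if_pos hj0]
      · rw [if_neg hj0]
        simp only [if_neg hj0]
        simp
    rw [List.map_congr_left hterm]
    by_cases hr : a0 < 0 ∨ 5 < a0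
    · have hz : ∀ j ∈ List.range 6,
          (if (j : Int) = a0 then
            ((comb j g).map (fun c1 =>
              List.countP (fun c2 => checkTail (q0 :: qt) ans (c1 ++ c2))
                (comb (5 - j) rest))).sum
          else 0) = 0 := by
        intro j hj
        have := List.mem_range.mp hj
        exact if_neg (by omega)
      rw [List.map_congr_left hz]
      have hqs0 : PySem.List.pyGetD ((q0 :: qt).map (fun code => PySem.Set.ofList code)) 0 []
          = PySem.Set.ofList q0 := by
        rw [PySem.List.pyGetD_ofNat']; rfl
      unfold solution_alt
      rw [if_neg (by simp : ¬(q0 :: qt = ([] : List (List Int))))]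
      simp only [hqs0]
      rw [← ha0, if_pos hr]
      simp
    · rw [sumB_eq n q0 qt ans (by rw [← ha0]; exact hr), ← ha0]
      push_neg at hr
      have h6 : a0 = 0 ∨ a0 = 1 ∨ a0 = 2 ∨ a0 = 3 ∨ a0 = 4 ∨ a0 = 5 := by omega
      have hrange6 : List.range 6 = [0, 1, 2, 3, 4, 5] := by decide
      rw [hrange6, ← hnums, ← hgdef, ← hrdef]
      rcases h6 with h | h | h | h | h | h <;> rw [h] <;>
        norm_num [← cast_sum_map] <;> simp

-- ===== VERDICT (by name: the statement is the Claim_ definition above) =====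
theorem solution_spec : Claim_equal_solution := by
  intro n q ans _ _
  unfold Spec_solution
  exact main_eq n q ans
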